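-- pv_equiv track=rewrite | github.com/darrensiegel/llmsys_f25_hw5 | pipeline/pipe.py | _clock_cycles
-- ===== SOURCE A (Python) =====
-- from typing import Any, Iterable, Iterator, List, Optional, Union, Sequence, Tuple, cast
--
-- def _clock_cycles(num_batches: int, num_partitions: int) -> Iterable[List[Tuple[int, int]]]:
--     '''Generate schedules for each clock cycle.
--
--     An example of the generated schedule for m=3 and n=3 is as follows:
--
--     k (i,j) (i,j) (i,j)
--     - ----- ----- -----
--     0 (0,0)
--     1 (1,0) (0,1)
--     2 (2,0) (1,1) (0,2)
--     3       (2,1) (1,2)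
--     4             (2,2)
--
--     where k is the clock number, i is the index of micro-batch, and j is the index of partition.
--
--     Each schedule is a list of tuples. Each tuple contains the index of micro-batch and the index of partition.
--     This function should yield schedules for each clock cycle.
--     '''
--     # BEGIN ASSIGN5_2_1
--     if num_batches <= 0 or num_partitions <= 0:
--         return []
--
--     total_ticks = num_batches + num_partitions - 1
--     for tick in range(total_ticks):
--         cycle = []
--         for part in range(num_partitions):
--             batch_idx = tick - part
--             if batch_idx < 0 or batch_idx >= num_batches:
--                 continue
--             # scoot along the diagonals of Figure 3 basically
--             cycle.append((batch_idx, part))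
--         if cycle:
--             yield cycle
-- ===== SOURCE B (Python) =====
-- def _clock_cycles(num_batches, num_partitions):
--     if num_batches <= 0 or num_partitions <= 0:
--         return []
--     buckets = [[] for _ in range(num_batches + num_partitions - 1)]
--     for part in range(num_partitions):
--         for batch in range(num_batches):
--             buckets[batch + part].append((batch, part))
--     return buckets
-- ===== Notes on version B (the rewrite author's own statement) =====
-- stated objective: alternative
-- what changed: B scatters: it allocates the m+n-1 cycle buckets once and makes a single pass over all (batch, part) cells, appending each cell to bucket batch+part, instead of A's per-tick gather that rescans all n partitions for every tick and skips out-of-range ones.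
import Mathlib
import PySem

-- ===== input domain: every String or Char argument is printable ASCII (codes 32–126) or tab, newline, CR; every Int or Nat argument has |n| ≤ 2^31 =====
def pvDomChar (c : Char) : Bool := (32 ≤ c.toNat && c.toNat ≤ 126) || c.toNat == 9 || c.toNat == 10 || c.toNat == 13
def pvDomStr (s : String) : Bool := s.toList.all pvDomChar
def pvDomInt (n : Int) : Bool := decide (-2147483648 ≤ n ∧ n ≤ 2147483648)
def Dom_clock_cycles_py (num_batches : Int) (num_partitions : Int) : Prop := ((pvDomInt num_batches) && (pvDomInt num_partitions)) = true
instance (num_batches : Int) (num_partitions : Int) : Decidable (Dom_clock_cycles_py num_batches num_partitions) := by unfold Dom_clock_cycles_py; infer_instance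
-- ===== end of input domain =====

-- B replaces A's per-tick gather (rescanning all partitions each tick) by a one-pass scatter of every (batch, part) cell into bucket batch+part; objective: alternative.


-- ===== PORT A =====
-- literal transliteration of A: for each tick scan all partitions, skip out-of-range batch
-- indices, collect the cycle, and append it only if nonempty
def clock_cycles_py (num_batches : Int) (num_partitions : Int) : List (List (Int × Int)) :=
  if num_batches ≤ 0 ∨ num_partitions ≤ 0 then []
  else
    let total_ticks := num_batches + num_partitions - 1
    (PySem.List.pyRange 0 total_ticks 1).foldl (fun acc tick =>
      let cycle := (PySem.List.pyRange 0 num_partitions 1).foldl (fun c part =>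
        let batch_idx := tick - part
        if batch_idx < 0 ∨ batch_idx ≥ num_batches then c
        else c ++ [(batch_idx, part)]) []
      if cycle ≠ [] then acc ++ [cycle] else acc) []

-- ===== PORT B =====
-- literal transliteration of B: allocate the m+n-1 empty buckets, then one pass over all
-- (batch, part) cells appending each to bucket batch+part ('buckets[batch+part].append(...)'
-- is List.modify; the index batch+part is ≥ 0 inside the loops, so .toNat is exact)
def clock_cycles_py_alt (num_batches : Int) (num_partitions : Int) : List (List (Int × Int)) :=
  if num_batches ≤ 0 ∨ num_partitions ≤ 0 then []
  else
    let buckets : List (List (Int × Int)) :=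
      (PySem.List.pyRange 0 (num_batches + num_partitions - 1) 1).map (fun _ => [])
    (PySem.List.pyRange 0 num_partitions 1).foldl (fun bs part =>
      (PySem.List.pyRange 0 num_batches 1).foldl (fun bs batch =>
        bs.modify (batch + part).toNat (· ++ [(batch, part)])) bs) buckets

-- ===== PRECONDITION & SPEC =====
def Spec_clock_cycles_py (num_batches : Int) (num_partitions : Int) (out : List (List (Int × Int))) : Prop := out = clock_cycles_py_alt num_batches num_partitions
instance (num_batches : Int) (num_partitions : Int) (out : List (List (Int × Int))) : Decidable (Spec_clock_cycles_py num_batches num_partitions out) := by unfold Spec_clock_cycles_py; infer_instance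

-- ===== CLAIM (what is proved, stated in full; the proofs are below) =====
def Claim_equal_clock_cycles_py : Prop := ∀ (num_batches : Int) (num_partitions : Int), Dom_clock_cycles_py num_batches num_partitions → Spec_clock_cycles_py num_batches num_partitions (clock_cycles_py num_batches num_partitions)

-- ===== LEMMAS AND PROOFS =====

-- shared closed form both ports are proved equal to: for each tick the valid partition range
def pvGather (m n : Int) : List (List (Int × Int)) :=
  (PySem.List.pyRange 0 (m + n - 1) 1).map (fun t =>
    (PySem.List.pyRange (max 0 (t - m + 1)) (min n (t + 1)) 1).map (fun j => (t - j, j)))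

-- A's inner scan over all partitions equals the closed-form valid range per tick
theorem pv_inner_eq (m n tick : Int) (hm : 0 < m) (hn : 0 < n) :
    (PySem.List.pyRange 0 n 1).foldl (fun c part =>
      if tick - part < 0 ∨ tick - part ≥ m then c
      else c ++ [(tick - part, part)]) [] =
    (PySem.List.pyRange (max 0 (tick - m + 1)) (min n (tick + 1)) 1).map
      (fun part => (tick - part, part)) := by
  have hflip : ∀ (c : List (Int × Int)) (part : Int),
      (if tick - part < 0 ∨ tick - part ≥ m then c else c ++ [(tick - part, part)]) =
      (if (decide (tick - m + 1 ≤ part ∧ part ≤ tick) : Bool) then c ++ [(tick - part, part)] else c) := by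
    intro c part
    by_cases h : tick - part < 0 ∨ tick - part ≥ m
    · rw [if_pos h, if_neg (by simpa using (by omega : ¬ (tick - m + 1 ≤ part ∧ part ≤ tick)))]
    · rw [if_neg h, if_pos (by simpa using (by omega : tick - m + 1 ≤ part ∧ part ≤ tick))]
  simp only [hflip]
  rw [PySem.List.foldl_append_if]
  by_cases hr : max 0 (tick - m + 1) ≤ min n (tick + 1)
  · have h1 : (0 : Int) ≤ max 0 (tick - m + 1) := by omega
    have h2 : min n (tick + 1) ≤ n := by omega
    rw [PySem.List.pyRange_one_append 0 (max 0 (tick - m + 1)) n h1 (by omega),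
        PySem.List.pyRange_one_append (max 0 (tick - m + 1)) (min n (tick + 1)) n hr h2]
    rw [List.filter_append, List.filter_append]
    rw [List.filter_eq_nil_iff.mpr (by
      intro x hx
      have := PySem.List.mem_pyRange_one.mp hx
      simpa using (by omega : ¬ (tick - m + 1 ≤ x ∧ x ≤ tick)))]
    rw [List.filter_eq_self.mpr (by
      intro x hx
      have := PySem.List.mem_pyRange_one.mp hx
      simpa using (by omega : tick - m + 1 ≤ x ∧ x ≤ tick))]
    rw [List.filter_eq_nil_iff.mpr (by
      intro x hx
      have := PySem.List.mem_pyRange_one.mp hx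
      simpa using (by omega : ¬ (tick - m + 1 ≤ x ∧ x ≤ tick)))]
    simp
  · rw [PySem.List.pyRange_one_eq_nil (by omega : min n (tick + 1) ≤ max 0 (tick - m + 1))]
    rw [List.filter_eq_nil_iff.mpr (by
      intro x hx
      have := PySem.List.mem_pyRange_one.mp hx
      simpa using (by omega : ¬ (tick - m + 1 ≤ x ∧ x ≤ tick)))]
    simp

-- A equals the closed form
theorem pv_a_eq_gather (m n : Int) (hm : 0 < m) (hn : 0 < n) :
    clock_cycles_py m n = pvGather m n := by
  unfold clock_cycles_py pvGather
  rw [if_neg (by omega)]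
  simp only [pv_inner_eq m n _ hm hn]
  rw [PySem.List.foldl_congr_mem _ _
    (fun acc tick => acc ++ [(PySem.List.pyRange (max 0 (tick - m + 1)) (min n (tick + 1)) 1).map
      (fun part => (tick - part, part))]) [] (by
    intro acc tick htick
    have hb := PySem.List.mem_pyRange_one.mp htick
    have hlt : max 0 (tick - m + 1) < min n (tick + 1) := by omega
    rw [if_pos (by rw [PySem.List.pyRange_one_cons hlt]; simp)])]
  rw [PySem.List.foldl_append_singleton_eq_map]
  simp

-- scatter machinery: folding 'modify idx x (· ++ [x])' preserves the length …
theorem pv_scatter_length {α : Type} (idx : α → Nat) (ups : List α) (bs : List (List α)) :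
    (ups.foldl (fun b x => b.modify (idx x) (· ++ [x])) bs).length = bs.length := by
  induction ups generalizing bs with
  | nil => rfl
  | cons x ups ih => simp [List.foldl_cons, ih, List.length_modify]

-- … and bucket t ends up with its old contents followed by the updates aimed at t, in order
theorem pv_scatter_get {α : Type} (idx : α → Nat) (ups : List α) (bs : List (List α))
    (t : Nat) (ht : t < bs.length) :
    (ups.foldl (fun b x => b.modify (idx x) (· ++ [x])) bs)[t]? =
    some (bs[t] ++ ups.filter (fun x => idx x = t)) := by
  induction ups generalizing bs with
  | nil => simp [List.getElem?_eq_getElem ht]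
  | cons x ups ih =>
    have ht' : t < (bs.modify (idx x) (· ++ [x])).length := by
      simpa [List.length_modify] using ht
    rw [List.foldl_cons, ih _ ht']
    rw [List.getElem_modify]
    by_cases h : idx x = t
    · simp [h, List.append_assoc]
    · simp [h]

-- filter of a unit range for a single value
theorem pv_filter_single (a b c : Int) :
    (PySem.List.pyRange a b 1).filter (fun i => decide (i = c)) =
    if a ≤ c ∧ c < b then [c] else [] := by
  by_cases h : a ≤ c ∧ c < b
  · rw [if_pos h,
        PySem.List.pyRange_one_append a c b h.1 (by omega),
        PySem.List.pyRange_one_cons h.2, List.filter_append]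
    rw [List.filter_eq_nil_iff.mpr (by
      intro x hx
      have := PySem.List.mem_pyRange_one.mp hx
      simpa using (by omega : ¬ x = c))]
    rw [List.filter_cons_of_pos (by simp)]
    rw [List.filter_eq_nil_iff.mpr (by
      intro x hx
      have := PySem.List.mem_pyRange_one.mp hx
      simpa using (by omega : ¬ x = c))]
    simp
  · rw [if_neg h, List.filter_eq_nil_iff.mpr (by
      intro x hx
      have := PySem.List.mem_pyRange_one.mp hx
      simpa using (by omega : ¬ x = c))]

-- a flatMap of guarded singletons is a map over the filtered list
theorem pv_flatMap_ite_singleton {α β : Type} (l : List α) (p : α → Prop) [DecidablePred p]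
    (g : α → β) :
    (l.flatMap (fun x => if p x then [g x] else [])) = (l.filter (fun x => decide (p x))).map g := by
  induction l with
  | nil => rfl
  | cons x l ih =>
    by_cases h : p x
    · simp [List.flatMap_cons, h, ih, List.filter_cons_of_pos]
    · simp [List.flatMap_cons, h, ih, List.filter_cons_of_neg]

-- the filtered partition range per tick is exactly the closed-form range
theorem pv_filter_range (m n t : Int) (hm : 0 < m) (hn : 0 < n) (h0 : 0 ≤ t)
    (ht : t < m + n - 1) :
    (PySem.List.pyRange 0 n 1).filter (fun j => decide (0 ≤ t - j ∧ t - j < m)) =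
    PySem.List.pyRange (max 0 (t - m + 1)) (min n (t + 1)) 1 := by
  have h1 : (0 : Int) ≤ max 0 (t - m + 1) := by omega
  have h2 : max 0 (t - m + 1) ≤ min n (t + 1) := by omega
  have h3 : min n (t + 1) ≤ n := by omega
  rw [PySem.List.pyRange_one_append 0 (max 0 (t - m + 1)) n h1 (by omega),
      PySem.List.pyRange_one_append (max 0 (t - m + 1)) (min n (t + 1)) n h2 h3,
      List.filter_append, List.filter_append]
  rw [List.filter_eq_nil_iff.mpr (by
    intro x hx
    have := PySem.List.mem_pyRange_one.mp hx
    simpa using (by omega : ¬ (0 ≤ t - x ∧ t - x < m)))]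
  rw [List.filter_eq_self.mpr (by
    intro x hx
    have := PySem.List.mem_pyRange_one.mp hx
    simpa using (by omega : 0 ≤ t - x ∧ t - x < m))]
  rw [List.filter_eq_nil_iff.mpr (by
    intro x hx
    have := PySem.List.mem_pyRange_one.mp hx
    simpa using (by omega : ¬ (0 ≤ t - x ∧ t - x < m)))]
  simp

-- B equals the closed form
theorem pv_b_eq_gather (m n : Int) (hm : 0 < m) (hn : 0 < n) :
    clock_cycles_py_alt m n = pvGather m n := by
  unfold clock_cycles_py_alt pvGather
  rw [if_neg (by omega)]
  -- turn the double scatter loop into one fold over the flattened update list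
  have hmap : ∀ (bs : List (List (Int × Int))) (part : Int),
      (PySem.List.pyRange 0 m 1).foldl (fun bs batch =>
        bs.modify (batch + part).toNat (· ++ [(batch, part)])) bs =
      ((PySem.List.pyRange 0 m 1).map (fun batch => (batch, part))).foldl
        (fun bs p => bs.modify (p.1 + p.2).toNat (· ++ [p])) bs := by
    intro bs part; rw [List.foldl_map]
  have hflat :
      (PySem.List.pyRange 0 n 1).foldl (fun bs part =>
        (PySem.List.pyRange 0 m 1).foldl (fun bs batch =>
          bs.modify (batch + part).toNat (· ++ [(batch, part)])) bs)
        ((PySem.List.pyRange 0 (m + n - 1) 1).map (fun _ => ([] : List (Int × Int)))) =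
      ((PySem.List.pyRange 0 n 1).flatMap (fun part =>
        (PySem.List.pyRange 0 m 1).map (fun batch => (batch, part)))).foldl
        (fun bs p => bs.modify ((p.1 + p.2).toNat) (· ++ [p]))
        ((PySem.List.pyRange 0 (m + n - 1) 1).map (fun _ => ([] : List (Int × Int)))) := by
    rw [List.foldl_flatMap]
    exact PySem.List.foldl_congr_mem _ _ _ _ (by intro acc part _; rw [hmap])
  rw [hflat]
  set ups := (PySem.List.pyRange 0 n 1).flatMap (fun part =>
    (PySem.List.pyRange 0 m 1).map (fun batch => (batch, part))) with hups
  have hlen0 : ((PySem.List.pyRange 0 (m + n - 1) 1).map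
      (fun _ => ([] : List (Int × Int)))).length = (m + n - 1).toNat := by
    simp [PySem.List.length_pyRange_one]
  apply List.ext_getElem?
  intro t
  by_cases hlt : t < (m + n - 1).toNat
  · rw [pv_scatter_get _ ups _ t (by rw [hlen0]; exact hlt)]
    have hinit : ((PySem.List.pyRange 0 (m + n - 1) 1).map
        (fun _ => ([] : List (Int × Int))))[t]'(by rw [hlen0]; exact hlt) = [] := by
      simp
    rw [hinit, List.nil_append]
    -- right-hand side: element t of the gather map
    have hrhs : ((PySem.List.pyRange 0 (m + n - 1) 1).map (fun tk =>
        (PySem.List.pyRange (max 0 (tk - m + 1)) (min n (tk + 1)) 1).map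
          (fun j => (tk - j, j))))[t]? =
        some ((PySem.List.pyRange (max 0 ((t : Int) - m + 1)) (min n ((t : Int) + 1)) 1).map
          (fun j => ((t : Int) - j, j))) := by
      rw [List.getElem?_map, PySem.List.getElem?_pyRange_one 0 (m + n - 1) t,
          if_pos (by omega)]
      simp
    rw [hrhs]
    -- left-hand side: the updates aimed at bucket t
    rw [hups, List.filter_flatMap]
    have hj : ∀ j ∈ PySem.List.pyRange 0 n 1,
        ((PySem.List.pyRange 0 m 1).map (fun batch => (batch, j))).filter
          (fun p => ((p.1 + p.2).toNat = t : Bool)) =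
        (if 0 ≤ (t : Int) - j ∧ (t : Int) - j < m then [((t : Int) - j, j)] else []) := by
      intro j hjmem
      have hj0 := PySem.List.mem_pyRange_one.mp hjmem
      rw [List.filter_map]
      have hcongr : (PySem.List.pyRange 0 m 1).filter
            ((fun p => ((p.1 + p.2).toNat = t : Bool)) ∘ fun batch => (batch, j)) =
          (PySem.List.pyRange 0 m 1).filter (fun i => decide (i = (t : Int) - j)) := by
        apply List.filter_congr
        intro i himem
        have hi := PySem.List.mem_pyRange_one.mp himem
        simp only [Function.comp_apply, decide_eq_decide]
        omega
      rw [hcongr, pv_filter_single]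
      by_cases h : (0 : Int) ≤ (t : Int) - j ∧ (t : Int) - j < m
      · rw [if_pos (by omega), if_pos h]; simp
      · rw [if_neg (by omega), if_neg h]; simp
    rw [List.flatMap_congr hj]
    rw [pv_flatMap_ite_singleton _ (fun j => 0 ≤ (t : Int) - j ∧ (t : Int) - j < m)]
    rw [pv_filter_range m n t hm hn (by omega) (by omega)]
  · rw [List.getElem?_eq_none (by rw [pv_scatter_length, hlen0]; omega),
        List.getElem?_eq_none (by simp [PySem.List.length_pyRange_one]; omega)]

-- ===== VERDICT (by name: the statement is the Claim_ definition above) =====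
theorem clock_cycles_py_spec : Claim_equal_clock_cycles_py := by
  intro m n _
  unfold Spec_clock_cycles_py
  by_cases h : m ≤ 0 ∨ n ≤ 0
  · unfold clock_cycles_py clock_cycles_py_alt
    rw [if_pos h, if_pos h]
  · rw [pv_a_eq_gather m n (by omega) (by omega),
        pv_b_eq_gather m n (by omega) (by omega)]
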